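-- pv_equiv track=rewrite | github.com/uf-icbr-bioinformatics/ba3p | bin/writeModelXML.py | makeFromToLine
-- ===== SOURCE A (Python) =====
-- def makeFromToLine(n, i, j):
--     d = []
--     for row in range(n):
--         for col in range(n):
--             if row == i and col == j:
--                 d.append("1")
--             else:
--                 d.append("0")
--     return d
-- ===== SOURCE B (Python) =====
-- def makeFromToLine(n, i, j):
--     length = n * n if n > 0 else 0
--     d = ["0"] * length
--     if 0 <= i < n and 0 <= j < n:
--         d[i * n + j] = "1"
--     return d
-- ===== Notes on version B (the rewrite author's own statement) =====
-- stated objective: simpler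
-- what changed: Replaces the nested per-cell comparison loops with a single ['0']*(n*n) allocation and one direct flat-index write at i*n+j (guarded by the bounds check), eliminating n*n equality tests.
import Mathlib
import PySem

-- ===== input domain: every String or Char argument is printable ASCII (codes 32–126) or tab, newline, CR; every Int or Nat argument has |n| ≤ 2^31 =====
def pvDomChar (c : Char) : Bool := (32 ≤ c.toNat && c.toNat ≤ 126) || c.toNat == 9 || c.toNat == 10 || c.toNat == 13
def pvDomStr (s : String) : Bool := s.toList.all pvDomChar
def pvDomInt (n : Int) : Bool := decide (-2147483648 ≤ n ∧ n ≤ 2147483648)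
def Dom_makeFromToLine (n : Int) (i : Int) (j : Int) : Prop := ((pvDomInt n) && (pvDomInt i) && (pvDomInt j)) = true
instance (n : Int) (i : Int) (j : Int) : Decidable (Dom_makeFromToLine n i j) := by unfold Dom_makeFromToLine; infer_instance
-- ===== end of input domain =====

-- B builds the all-"0" flat matrix in one replicate and writes the single "1" by direct
-- flat-index placement (i*n+j), instead of A's nested per-cell comparison loops. Objective: simpler.

-- ===== PORT A =====
def makeFromToLine (n : Int) (i : Int) (j : Int) : List String :=
  (PySem.List.pyRange 0 n).foldl (fun d row =>
    (PySem.List.pyRange 0 n).foldl (fun d col =>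
      if row = i ∧ col = j then d ++ ["1"] else d ++ ["0"]) d) []

-- ===== PORT B =====
def makeFromToLine_alt (n : Int) (i : Int) (j : Int) : List String :=
  let len : Nat := if 0 < n then (n * n).toNat else 0
  let d := List.replicate len "0"
  if 0 ≤ i ∧ i < n ∧ 0 ≤ j ∧ j < n then d.set (i * n + j).toNat "1" else d

-- ===== PRECONDITION & SPEC =====
def Spec_makeFromToLine (n : Int) (i : Int) (j : Int) (out : List String) : Prop := out = makeFromToLine_alt n i j
instance (n : Int) (i : Int) (j : Int) (out : List String) : Decidable (Spec_makeFromToLine n i j out) := by unfold Spec_makeFromToLine; infer_instance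

-- ===== CLAIM (what is proved, stated in full; the proofs are below) =====
def Claim_equal_makeFromToLine : Prop := ∀ (n : Int) (i : Int) (j : Int), Dom_makeFromToLine n i j → Spec_makeFromToLine n i j (makeFromToLine n i j)

-- ===== LEMMAS AND PROOFS =====

-- the inner loop appends one cell per column
theorem inner_loop_eq (i j row : Int) (l : List Int) (d : List String) :
    l.foldl (fun d col => if row = i ∧ col = j then d ++ ["1"] else d ++ ["0"]) d
      = d ++ l.map (fun col => if row = i ∧ col = j then "1" else "0") := by
  induction l generalizing d with
  | nil => simp
  | cons x xs ih => simp only [List.foldl_cons, List.map_cons]; split_ifs <;> simp [ih]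

-- the outer loop concatenates the rows
theorem outer_loop_eq (l : List Int) (d : List String) (g : Int → List String) :
    l.foldl (fun d r => d ++ g r) d = d ++ l.flatMap g := by
  induction l generalizing d with
  | nil => simp
  | cons x xs ih => simp [ih]

-- a flatMap of all-"0" rows is one big replicate
theorem flatMap_replicate {α β : Type} (l : List α) (N : Nat) (x : β) :
    l.flatMap (fun _ => List.replicate N x) = List.replicate (l.length * N) x := by
  induction l with
  | nil => simp
  | cons a t ih =>
      rw [List.flatMap_cons, ih, ← List.replicate_add]
      congr 1
      simp [Nat.succ_mul, Nat.add_comm]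

-- a row with one marked column is replicate-with-set
theorem row_set (N J : Nat) :
    (List.range N).map (fun c => if c = J then "1" else "0")
      = (List.replicate N "0").set J "1" := by
  apply List.ext_getElem
  · simp
  · intro k h1 h2
    simp only [List.getElem_map, List.getElem_range, List.getElem_set, List.getElem_replicate]
    by_cases hk : k = J <;> simp [hk, Ne.symm]

-- an all-"0" row
theorem row_zero (N : Nat) (P : Nat → Prop) [DecidablePred P] (hP : ∀ c, c < N → ¬ P c) :
    (List.range N).map (fun c => if P c then "1" else "0") = List.replicate N "0" := by
  rw [List.map_congr_left (g := fun _ => "0")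
    (fun c hc => if_neg (hP c (List.mem_range.mp hc)))]
  simp [List.map_const']

-- splitting a replicate around one set position (all lengths abstract, linear arithmetic only)
theorem set_mid (a e N J : Nat) (hJ : J < N) :
    (List.replicate (a + (N + e)) "0").set (a + J) "1"
      = List.replicate a "0"
        ++ ((List.replicate N "0").set J "1" ++ List.replicate e "0") := by
  rw [List.replicate_add, List.replicate_add, List.set_append]
  simp only [List.length_replicate]
  rw [if_neg (by omega), List.set_append]
  simp only [List.length_replicate]
  rw [if_pos (by omega)]
  have ha : a + J - a = J := by omega
  rw [ha]

-- assembling the rows when the marked cell exists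
theorem assemble (row : Nat → List String) (N I J : Nat) (hI : I < N) (hJ : J < N)
    (h0 : ∀ r, r ≠ I → row r = List.replicate N "0")
    (h1 : row I = (List.replicate N "0").set J "1") :
    (List.range N).flatMap row = (List.replicate (N * N) "0").set (I * N + J) "1" := by
  have ht : I + 1 + (N - (I + 1)) = N := by omega
  have hsplit : List.range N
      = (List.range' 0 I ++ [I]) ++ List.range' (I + 1) (N - (I + 1)) := by
    rw [List.range_eq_range', ← ht, ← List.range'_append (s := 0) (m := I + 1) (step := 1),
      ← List.range'_append (s := 0) (m := I) (step := 1)]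
    simp [List.range'_one]
  have hzero : ∀ (l : List Nat), (∀ r ∈ l, r ≠ I) →
      l.flatMap row = List.replicate (l.length * N) "0" := by
    intro l hl
    rw [List.flatMap_congr (g := fun _ => List.replicate N "0")
      (fun r hr => h0 r (hl r hr))]
    exact flatMap_replicate l N "0"
  have hNN : N * N = I * N + (N + (N - (I + 1)) * N) := by
    calc N * N = (I + 1 + (N - (I + 1))) * N := by rw [ht]
      _ = I * N + (N + (N - (I + 1)) * N) := by ring
  rw [hsplit, List.flatMap_append, List.flatMap_append,
    hzero (List.range' 0 I) (by intro r hr; have := List.mem_range'_1.mp hr; omega),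
    hzero (List.range' (I + 1) (N - (I + 1)))
      (by intro r hr; have := List.mem_range'_1.mp hr; omega),
    List.flatMap_cons, List.flatMap_nil, List.append_nil, h1, hNN,
    set_mid (I * N) ((N - (I + 1)) * N) N J hJ]
  simp [List.length_range', List.append_assoc]

-- ===== VERDICT (by name: the statement is the Claim_ definition above) =====
theorem makeFromToLine_spec : Claim_equal_makeFromToLine := by
  intro n i j _
  unfold Spec_makeFromToLine makeFromToLine makeFromToLine_alt
  simp only [inner_loop_eq, outer_loop_eq, List.nil_append]
  rw [show PySem.List.pyRange 0 n = (List.range (n.toNat)).map (fun k : Nat => (k : Int)) by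
    simpa using PySem.List.pyRange_one 0 n]
  rw [List.flatMap_map]
  simp only [List.map_map, Function.comp_def]
  by_cases h : 0 ≤ i ∧ i < n ∧ 0 ≤ j ∧ j < n
  · obtain ⟨h1, h2, h3, h4⟩ := h
    have hn : 0 < n := lt_of_le_of_lt h1 h2
    have hi : i = (i.toNat : Int) := (Int.toNat_of_nonneg h1).symm
    have hj : j = (j.toNat : Int) := (Int.toNat_of_nonneg h3).symm
    have hnn : n = (n.toNat : Int) := (Int.toNat_of_nonneg hn.le).symm
    rw [if_pos ⟨h1, h2, h3, h4⟩, if_pos hn]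
    have hlen : (n * n).toNat = n.toNat * n.toNat := Int.toNat_mul hn.le hn.le
    have hidx : (i * n + j).toNat = i.toNat * n.toNat + j.toNat := by
      conv_lhs => rw [hi, hj, hnn, ← Int.natCast_mul, ← Int.natCast_add]
      exact Int.toNat_natCast _
    rw [hlen, hidx]
    have hcond : ∀ r c : Nat,
        (((r : Int) = i ∧ (c : Int) = j)) = ((r = i.toNat ∧ c = j.toNat)) := by
      intro r c
      apply propext
      constructor <;> (intro ⟨ha, hb⟩; constructor <;> omega)
    simp only [hcond]
    exact assemble _ n.toNat i.toNat j.toNat (by omega) (by omega)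
      (fun r hr => row_zero n.toNat _ (by intro c _ ⟨ha, _⟩; exact hr ha))
      (by
        rw [List.map_congr_left (g := fun c => if c = j.toNat then "1" else "0")
          (by intro c _; simp)]
        exact row_set n.toNat j.toNat)
  · rw [if_neg h]
    have hall : (List.range n.toNat).flatMap
        (fun r : Nat => (List.range n.toNat).map
          (fun c : Nat => if ((r : Int) = i ∧ (c : Int) = j) then "1" else "0"))
        = List.replicate (n.toNat * n.toNat) "0" := by
      rw [List.flatMap_congr (g := fun _ => List.replicate n.toNat "0")]
      · simpa using flatMap_replicate (List.range n.toNat) n.toNat "0"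
      · intro r hr
        apply row_zero
        intro c hc ⟨ha, hb⟩
        have hrn := List.mem_range.mp hr
        apply h
        constructor
        · omega
        constructor
        · omega
        constructor
        · omega
        · omega
    rw [hall]
    by_cases hn : 0 < n
    · rw [if_pos hn, Int.toNat_mul hn.le hn.le]
    · rw [if_neg hn]
      have : n.toNat = 0 := by omega
      simp [this]
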